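-- pv_equiv track=rewrite | github.com/vijayshreepathak/Project-Nexus | app.py | _social_predictions
-- ===== SOURCE A (Python) =====
-- def _social_predictions(user_data):
--     calendar_events = user_data.get('calendar_events', [])
--     social_predictions = []
--
--     for event in calendar_events:
--         if 'birthday' in event.lower():
--             social_predictions.append("Gift ideas for birthday celebration")
--         elif 'party' in event.lower():
--             social_predictions.append("Party supplies and decorations")
--         elif 'meeting' in event.lower():
--             social_predictions.append("Professional attire and accessories")
--         elif 'bbq' in event.lower():
--             social_predictions.append("BBQ essentials and outdoor dining")
--         elif 'gym' in event.lower():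
--             social_predictions.append("Fitness gear and protein supplements")
--
--     return social_predictions or ["Social gathering items"]
-- ===== SOURCE B (Python) =====
-- _TABLE = [
--     ('birthday', "Gift ideas for birthday celebration"),
--     ('party', "Party supplies and decorations"),
--     ('meeting', "Professional attire and accessories"),
--     ('bbq', "BBQ essentials and outdoor dining"),
--     ('gym', "Fitness gear and protein supplements"),
-- ]
--
--
-- def _social_predictions(user_data):
--     # Keyword-major staged passes: one sweep over the events per keyword,
--     # labelling each still-unlabelled event whose lowered text contains it.
--     lowered = [e.lower() for e in user_data.get('calendar_events', [])]
--     labels = [None] * len(lowered)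
--     for kw, pred in _TABLE:
--         for i, lo in enumerate(lowered):
--             if labels[i] is None and kw in lo:
--                 labels[i] = pred
--     preds = [p for p in labels if p is not None]
--     return preds or ["Social gathering items"]
-- ===== Notes on version B (the rewrite author's own statement) =====
-- stated objective: alternative
-- what changed: Reverses the loop nesting: instead of A's event-major elif ladder, B makes one pass over the events per keyword (keyword-major staged passes), filling a per-event label array only where still unlabelled, then filters the labels; priority is preserved because earlier keyword passes claim an event before later ones.
import Mathlib
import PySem

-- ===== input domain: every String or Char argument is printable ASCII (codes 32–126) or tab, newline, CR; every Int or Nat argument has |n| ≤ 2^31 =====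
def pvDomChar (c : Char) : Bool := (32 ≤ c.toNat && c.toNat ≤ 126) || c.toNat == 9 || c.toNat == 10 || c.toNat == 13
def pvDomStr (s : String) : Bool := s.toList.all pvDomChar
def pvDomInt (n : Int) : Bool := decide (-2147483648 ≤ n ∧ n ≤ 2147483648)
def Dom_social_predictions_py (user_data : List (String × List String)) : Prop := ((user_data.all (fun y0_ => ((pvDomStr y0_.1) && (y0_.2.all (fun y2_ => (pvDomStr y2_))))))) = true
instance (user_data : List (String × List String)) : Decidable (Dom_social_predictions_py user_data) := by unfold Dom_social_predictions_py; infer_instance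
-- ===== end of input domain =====

-- B reverses the loop nesting: keyword-major staged passes filling a per-event label
-- array (one sweep over the events per keyword), instead of A's event-major elif ladder
-- (objective: alternative).

-- ===== PORT A =====
def social_predictions_py (user_data : List (String × List String)) : List String :=
  let calendar_events := (PySem.Dict.mk user_data).getD "calendar_events" []
  let social_predictions := calendar_events.foldl (fun acc event =>
    if PySem.Str.isIn "birthday" (PySem.Str.lower event) then
      acc ++ ["Gift ideas for birthday celebration"]
    else if PySem.Str.isIn "party" (PySem.Str.lower event) then
      acc ++ ["Party supplies and decorations"]
    else if PySem.Str.isIn "meeting" (PySem.Str.lower event) then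
      acc ++ ["Professional attire and accessories"]
    else if PySem.Str.isIn "bbq" (PySem.Str.lower event) then
      acc ++ ["BBQ essentials and outdoor dining"]
    else if PySem.Str.isIn "gym" (PySem.Str.lower event) then
      acc ++ ["Fitness gear and protein supplements"]
    else acc) []
  if social_predictions = [] then ["Social gathering items"] else social_predictions

-- ===== PORT B =====
def pvTable : List (String × String) :=
  [("birthday", "Gift ideas for birthday celebration"),
   ("party", "Party supplies and decorations"),
   ("meeting", "Professional attire and accessories"),
   ("bbq", "BBQ essentials and outdoor dining"),
   ("gym", "Fitness gear and protein supplements")]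

-- one keyword pass: mutate labels in place is ported as a positional map over zip
def pvPass (kw pred : String) (lowered : List String) (labels : List (Option String)) :
    List (Option String) :=
  (lowered.zip labels).map (fun p =>
    if p.2 = none ∧ PySem.Str.isIn kw p.1 then some pred else p.2)

def social_predictions_py_alt (user_data : List (String × List String)) : List String :=
  let lowered := ((PySem.Dict.mk user_data).getD "calendar_events" []).map PySem.Str.lower
  let labels : List (Option String) := lowered.map (fun _ => none)
  let labels := pvTable.foldl (fun L kp => pvPass kp.1 kp.2 lowered L) labels
  let preds := labels.filterMap id
  if preds = [] then ["Social gathering items"] else preds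

-- ===== PRECONDITION & SPEC =====
def Spec_social_predictions_py (user_data : List (String × List String)) (out : List String) : Prop := out = social_predictions_py_alt user_data
instance (user_data : List (String × List String)) (out : List String) : Decidable (Spec_social_predictions_py user_data out) := by unfold Spec_social_predictions_py; infer_instance

-- ===== CLAIM (what is proved, stated in full; the proofs are below) =====
def Claim_equal_social_predictions_py : Prop := ∀ (user_data : List (String × List String)), Dom_social_predictions_py user_data → Spec_social_predictions_py user_data (social_predictions_py user_data)

-- ===== LEMMAS AND PROOFS =====

-- the first-match classification of one lowered event (proof-side helper)
def pvClassifyLower (lo : String) : Option String :=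
  pvTable.foldl (fun lab kp =>
    if lab = none ∧ PySem.Str.isIn kp.1 lo then some kp.2 else lab) none

-- zipping back with a positionally-mapped zip keeps the pairing
lemma pv_zip_map_pair (g : String × Option String → Option String)
    (lowered : List String) (labels : List (Option String)) :
    lowered.zip ((lowered.zip labels).map g)
      = (lowered.zip labels).map (fun p => (p.1, g p)) := by
  induction lowered generalizing labels with
  | nil => simp
  | cons x xs ih =>
    cases labels with
    | nil => simp
    | cons l ls => simp [ih]

-- the staged keyword-major passes compute the pointwise first-match fold
lemma pv_staged_eq (t : List (String × String)) (lowered : List String)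
    (labels : List (Option String)) (h : labels.length = lowered.length) :
    t.foldl (fun L kp => pvPass kp.1 kp.2 lowered L) labels
      = (lowered.zip labels).map (fun p =>
          t.foldl (fun lab kp =>
            if lab = none ∧ PySem.Str.isIn kp.1 p.1 then some kp.2 else lab) p.2) := by
  induction t generalizing labels with
  | nil =>
    simp only [List.foldl_nil]
    simpa using (List.map_snd_zip (le_of_eq h)).symm
  | cons kp t ih =>
    simp only [List.foldl_cons]
    rw [ih _ (by simp [pvPass, List.length_zip, h]), pvPass, pv_zip_map_pair]
    simp [List.map_map, Function.comp]

-- A's per-event elif ladder appends exactly the first-match classification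
lemma pv_step_eq (acc : List String) (event : String) :
    (if PySem.Str.isIn "birthday" (PySem.Str.lower event) then
      acc ++ ["Gift ideas for birthday celebration"]
    else if PySem.Str.isIn "party" (PySem.Str.lower event) then
      acc ++ ["Party supplies and decorations"]
    else if PySem.Str.isIn "meeting" (PySem.Str.lower event) then
      acc ++ ["Professional attire and accessories"]
    else if PySem.Str.isIn "bbq" (PySem.Str.lower event) then
      acc ++ ["BBQ essentials and outdoor dining"]
    else if PySem.Str.isIn "gym" (PySem.Str.lower event) then
      acc ++ ["Fitness gear and protein supplements"]
    else acc) = acc ++ (pvClassifyLower (PySem.Str.lower event)).toList := by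
  simp only [pvClassifyLower, pvTable, List.foldl]
  split_ifs <;> simp_all

-- A's accumulator loop computes acc ++ the per-event classifications
lemma pv_loop_eq (l : List String) (acc : List String) :
    l.foldl (fun acc event =>
      if PySem.Str.isIn "birthday" (PySem.Str.lower event) then
        acc ++ ["Gift ideas for birthday celebration"]
      else if PySem.Str.isIn "party" (PySem.Str.lower event) then
        acc ++ ["Party supplies and decorations"]
      else if PySem.Str.isIn "meeting" (PySem.Str.lower event) then
        acc ++ ["Professional attire and accessories"]
      else if PySem.Str.isIn "bbq" (PySem.Str.lower event) then
        acc ++ ["BBQ essentials and outdoor dining"]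
      else if PySem.Str.isIn "gym" (PySem.Str.lower event) then
        acc ++ ["Fitness gear and protein supplements"]
      else acc) acc
      = acc ++ l.filterMap (fun e => pvClassifyLower (PySem.Str.lower e)) := by
  induction l generalizing acc with
  | nil => simp
  | cons e t ih =>
    rw [List.foldl_cons, pv_step_eq, ih, List.filterMap_cons]
    cases pvClassifyLower (PySem.Str.lower e) <;> simp

-- B's staged passes, started on all-none labels, yield the same classifications
lemma pv_alt_labels (l : List String) :
    (pvTable.foldl (fun L kp => pvPass kp.1 kp.2 (l.map PySem.Str.lower) L)
        ((l.map PySem.Str.lower).map (fun _ => none))).filterMap id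
      = l.filterMap (fun e => pvClassifyLower (PySem.Str.lower e)) := by
  rw [pv_staged_eq _ _ _ (by simp)]
  have hz : (l.map PySem.Str.lower).zip ((l.map PySem.Str.lower).map (fun _ => none))
      = l.map (fun e => (PySem.Str.lower e, (none : Option String))) := by
    induction l with
    | nil => rfl
    | cons x xs ih => simp only [List.map_map] at ih; simp [ih]
  rw [hz]
  simp [List.filterMap_map, Function.comp, pvClassifyLower]

-- ===== VERDICT (by name: the statement is the Claim_ definition above) =====
theorem social_predictions_py_spec : Claim_equal_social_predictions_py := by
  intro user_data _
  unfold Spec_social_predictions_py social_predictions_py social_predictions_py_alt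
  simp only [pv_loop_eq, pv_alt_labels, List.nil_append]
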